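-- pv_equiv track=rewrite | github.com/khy0425/app-factory-complete | automation/khy0425-app-factory-core-cf63a8b/automation/serverless_monetization.py | _recommend_monetization_model
-- ===== SOURCE A (Python) =====
-- from typing import Dict, List
--
-- def _recommend_monetization_model(app_concept: str) -> Dict:
--     """앱 컨셉에 따른 최적 수익화 모델 추천"""
--
--     concept_lower = app_concept.lower()
--
--     if any(word in concept_lower for word in ["fitness", "health", "meditation", "sleep"]):
--         return {
--             "primary": "freemium_subscription",
--             "secondary": "one_time_premium",
--             "reasoning": "건강/피트니스 앱은 지속적 사용으로 구독 모델 적합"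
--         }
--     elif any(word in concept_lower for word in ["calculator", "converter", "utility"]):
--         return {
--             "primary": "ad_supported_free",
--             "secondary": "remove_ads_iap",
--             "reasoning": "유틸리티는 사용 빈도가 높아 광고 모델 효과적"
--         }
--     elif any(word in concept_lower for word in ["photo", "editor", "creative"]):
--         return {
--             "primary": "consumable_iap",
--             "secondary": "premium_features",
--             "reasoning": "크리에이티브 도구는 추가 컨텐츠/기능 판매 가능"
--         }
--     else:
--         return {
--             "primary": "freemium",
--             "secondary": "premium_upgrade",
--             "reasoning": "범용적으로 안전한 프리미엄 모델"
--         }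
-- ===== SOURCE B (Python) =====
-- from typing import Dict, List
--
-- # flat keyword -> priority rank (lower rank wins); no group structure in the scan
-- _KEYWORD_RANK = {
--     "fitness": 0, "health": 0, "meditation": 0, "sleep": 0,
--     "calculator": 1, "converter": 1, "utility": 1,
--     "photo": 2, "editor": 2, "creative": 2,
-- }
--
-- _MODELS = [
--     {"primary": "freemium_subscription", "secondary": "one_time_premium",
--      "reasoning": "건강/피트니스 앱은 지속적 사용으로 구독 모델 적합"},
--     {"primary": "ad_supported_free", "secondary": "remove_ads_iap",
--      "reasoning": "유틸리티는 사용 빈도가 높아 광고 모델 효과적"},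
--     {"primary": "consumable_iap", "secondary": "premium_features",
--      "reasoning": "크리에이티브 도구는 추가 컨텐츠/기능 판매 가능"},
--     {"primary": "freemium", "secondary": "premium_upgrade",
--      "reasoning": "범용적으로 안전한 프리미엄 모델"},
-- ]
--
-- def _recommend_monetization_model(app_concept: str) -> Dict:
--     """One flat pass over all keywords, keeping the minimum matched rank."""
--     concept_lower = app_concept.lower()
--     best = 3
--     for word, rank in _KEYWORD_RANK.items():
--         if word in concept_lower and rank < best:
--             best = rank
--     return dict(_MODELS[best])
-- ===== Notes on version B (the rewrite author's own statement) =====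
-- stated objective: alternative
-- what changed: Replaced the short-circuiting if/elif ladder of per-group any() checks by one exhaustive flat pass over all keywords that folds a minimum-priority-rank accumulator and then indexes a result table by that rank.
import Mathlib
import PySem

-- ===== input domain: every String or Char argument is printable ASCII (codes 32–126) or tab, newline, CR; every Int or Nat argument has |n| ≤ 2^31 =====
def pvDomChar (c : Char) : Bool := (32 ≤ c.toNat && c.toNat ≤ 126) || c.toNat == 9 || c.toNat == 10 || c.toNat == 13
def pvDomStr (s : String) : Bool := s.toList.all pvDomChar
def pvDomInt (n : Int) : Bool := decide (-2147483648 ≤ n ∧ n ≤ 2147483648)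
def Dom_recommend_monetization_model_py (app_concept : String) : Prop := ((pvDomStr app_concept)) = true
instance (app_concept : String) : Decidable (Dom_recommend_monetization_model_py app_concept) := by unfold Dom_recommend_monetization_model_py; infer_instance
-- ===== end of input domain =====

-- B replaces A's short-circuiting if/elif ladder by one exhaustive flat pass over all
-- keywords folding a minimum-priority-rank accumulator, then indexing a result table (alternative, same cost).

-- ===== PORT A =====
def recommend_monetization_model_py (app_concept : String) : List (String × String) :=
  let concept_lower := PySem.Str.lower app_concept
  if ["fitness", "health", "meditation", "sleep"].any (fun word => PySem.Str.isIn word concept_lower) then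
    [("primary", "freemium_subscription"), ("secondary", "one_time_premium"),
     ("reasoning", "건강/피트니스 앱은 지속적 사용으로 구독 모델 적합")]
  else if ["calculator", "converter", "utility"].any (fun word => PySem.Str.isIn word concept_lower) then
    [("primary", "ad_supported_free"), ("secondary", "remove_ads_iap"),
     ("reasoning", "유틸리티는 사용 빈도가 높아 광고 모델 효과적")]
  else if ["photo", "editor", "creative"].any (fun word => PySem.Str.isIn word concept_lower) then
    [("primary", "consumable_iap"), ("secondary", "premium_features"),
     ("reasoning", "크리에이티브 도구는 추가 컨텐츠/기능 판매 가능")]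
  else
    [("primary", "freemium"), ("secondary", "premium_upgrade"),
     ("reasoning", "범용적으로 안전한 프리미엄 모델")]

-- ===== PORT B =====
-- flat keyword → rank table (Python dict in insertion order)
def pvKeywordRank : List (String × Nat) :=
  [("fitness", 0), ("health", 0), ("meditation", 0), ("sleep", 0),
   ("calculator", 1), ("converter", 1), ("utility", 1),
   ("photo", 2), ("editor", 2), ("creative", 2)]

def pvModels : List (List (String × String)) :=
  [ [("primary", "freemium_subscription"), ("secondary", "one_time_premium"),
     ("reasoning", "건강/피트니스 앱은 지속적 사용으로 구독 모델 적합")],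
    [("primary", "ad_supported_free"), ("secondary", "remove_ads_iap"),
     ("reasoning", "유틸리티는 사용 빈도가 높아 광고 모델 효과적")],
    [("primary", "consumable_iap"), ("secondary", "premium_features"),
     ("reasoning", "크리에이티브 도구는 추가 컨텐츠/기능 판매 가능")],
    [("primary", "freemium"), ("secondary", "premium_upgrade"),
     ("reasoning", "범용적으로 안전한 프리미엄 모델")] ]

def recommend_monetization_model_py_alt (app_concept : String) : List (String × String) :=
  let concept_lower := PySem.Str.lower app_concept
  let best := pvKeywordRank.foldl
    (fun best p => if PySem.Str.isIn p.1 concept_lower = true ∧ p.2 < best then p.2 else best) 3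
  pvModels.getD best []

-- ===== PRECONDITION & SPEC =====
def Spec_recommend_monetization_model_py (app_concept : String) (out : List (String × String)) : Prop := out = recommend_monetization_model_py_alt app_concept
instance (app_concept : String) (out : List (String × String)) : Decidable (Spec_recommend_monetization_model_py app_concept out) := by unfold Spec_recommend_monetization_model_py; infer_instance

-- ===== CLAIM (what is proved, stated in full; the proofs are below) =====
def Claim_equal_recommend_monetization_model_py : Prop := ∀ (app_concept : String), Dom_recommend_monetization_model_py app_concept → Spec_recommend_monetization_model_py app_concept (recommend_monetization_model_py app_concept)

-- ===== LEMMAS AND PROOFS =====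

-- Folding B's min-rank step over a uniform-rank segment: the accumulator drops to r
-- exactly when some word of the segment matches and r improves on the accumulator.
theorem pv_fold_uniform (cl : String) (ws : List String) (r b : Nat) :
    (ws.map (fun w => (w, r))).foldl
      (fun best p => if PySem.Str.isIn p.1 cl = true ∧ p.2 < best then p.2 else best) b
    = if ws.any (fun w => PySem.Str.isIn w cl) ∧ r < b then r else b := by
  induction ws generalizing b with
  | nil => simp
  | cons w tl ih =>
    simp only [List.map_cons, List.foldl_cons, List.any_cons, ih]
    by_cases hw : PySem.Str.isIn w cl = true <;> by_cases hr : r < b <;>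
      simp [PySem.Str.isIn] at hw <;> simp [hw, hr]

-- ===== VERDICT (by name: the statement is the Claim_ definition above) =====
theorem recommend_monetization_model_py_spec : Claim_equal_recommend_monetization_model_py := by
  intro s _
  unfold Spec_recommend_monetization_model_py recommend_monetization_model_py recommend_monetization_model_py_alt
  have hsplit : pvKeywordRank
      = (["fitness", "health", "meditation", "sleep"].map (fun w => (w, 0)))
        ++ (["calculator", "converter", "utility"].map (fun w => (w, 1)))
        ++ (["photo", "editor", "creative"].map (fun w => (w, 2))) := by rfl
  simp only [hsplit, List.foldl_append, pv_fold_uniform]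
  by_cases h1 : ["fitness", "health", "meditation", "sleep"].any (fun word => PySem.Str.isIn word (PySem.Str.lower s)) = true <;>
  by_cases h2 : ["calculator", "converter", "utility"].any (fun word => PySem.Str.isIn word (PySem.Str.lower s)) = true <;>
  by_cases h3 : ["photo", "editor", "creative"].any (fun word => PySem.Str.isIn word (PySem.Str.lower s)) = true <;>
  simp only [h1, h2, h3, true_and, false_and, and_true, and_false, if_true, if_false] <;>
  norm_num [pvModels, List.getD]
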